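-- pv_equiv track=rewrite | github.com/KiritoU/series9_toronites | helper.py | generate_players_postmeta_data
-- ===== SOURCE A (Python) =====
-- def generate_players_postmeta_data(
--     episode_id, players: list, quality: str
-- ) -> list:
--     res = []
--     for i in range(len(players)):
--         iframe = players[i]
--         res.extend(
--             [
--                 (episode_id, f"player_{i}_name_player", ""),
--                 (episode_id, f"_player_{i}_name_player", "field_5a6ae00d1df8f"),
--                 (episode_id, f"player_{i}_type_player", "p_embed"),
--                 (episode_id, f"_player_{i}_type_player", "field_591fd3cc1c291"),
--                 (episode_id, f"player_{i}_quality_player", quality),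
--                 (episode_id, f"_player_{i}_quality_player", "field_5640cc8323220"),
--                 (
--                     episode_id,
--                     f"player_{i}_embed_player",
--                     iframe,
--                 ),
--                 (episode_id, f"_player_{i}_embed_player", "field_5640cc9823221"),
--             ]
--         )
--     return res
-- ===== SOURCE B (Python) =====
-- def generate_players_postmeta_data(episode_id, players: list, quality: str) -> list:
--     suffixes = ["name_player", "type_player", "quality_player", "embed_player"]
--     fields = ["field_5a6ae00d1df8f", "field_591fd3cc1c291", "field_5640cc8323220", "field_5640cc9823221"]
--
--     def cell(k):
--         i, slot = divmod(k, 8)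
--         j = slot // 2
--         if slot % 2:
--             return (episode_id, f"_player_{i}_{suffixes[j]}", fields[j])
--         return (episode_id, f"player_{i}_{suffixes[j]}", ["", "p_embed", quality, players[i]][j])
--
--     return [cell(k) for k in range(8 * len(players))]
-- ===== Notes on version B (the rewrite author's own statement) =====
-- stated objective: alternative
-- what changed: Replaces A's per-player loop extending eight hardcoded tuple literals with flat-index generation: a single comprehension over range(8*len(players)) that computes each tuple directly from its global index via divmod(k, 8) and small lookup tables for suffixes and values.
import Mathlib
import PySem

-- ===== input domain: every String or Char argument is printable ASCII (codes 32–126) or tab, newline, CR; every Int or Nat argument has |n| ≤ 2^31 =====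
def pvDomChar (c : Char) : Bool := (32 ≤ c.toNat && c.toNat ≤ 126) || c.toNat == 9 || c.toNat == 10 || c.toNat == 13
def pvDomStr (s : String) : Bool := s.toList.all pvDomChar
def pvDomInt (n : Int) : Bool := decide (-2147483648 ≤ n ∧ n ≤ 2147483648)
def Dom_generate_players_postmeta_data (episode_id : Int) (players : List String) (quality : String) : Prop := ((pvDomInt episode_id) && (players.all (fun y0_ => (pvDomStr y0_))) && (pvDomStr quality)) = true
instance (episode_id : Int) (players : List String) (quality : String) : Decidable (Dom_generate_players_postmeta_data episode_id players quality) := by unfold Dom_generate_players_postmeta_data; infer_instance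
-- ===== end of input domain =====

-- B replaces A's per-player loop (extending eight hardcoded tuple literals) with flat-index
-- generation: one comprehension over range(8*len(players)) computing each tuple from its global
-- index via divmod(k, 8) and small lookup tables; objective: alternative.

-- ===== PORT A =====
def generate_players_postmeta_data (episode_id : Int) (players : List String) (quality : String) : List (Int × String × String) :=
  (PySem.List.pyRange 0 players.length 1).foldl (fun res i =>
    let iframe := PySem.List.pyGetD players i ""
    res ++
      [ (episode_id, "player_" ++ PySem.Int.toStr i ++ "_name_player", ""),
        (episode_id, "_player_" ++ PySem.Int.toStr i ++ "_name_player", "field_5a6ae00d1df8f"),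
        (episode_id, "player_" ++ PySem.Int.toStr i ++ "_type_player", "p_embed"),
        (episode_id, "_player_" ++ PySem.Int.toStr i ++ "_type_player", "field_591fd3cc1c291"),
        (episode_id, "player_" ++ PySem.Int.toStr i ++ "_quality_player", quality),
        (episode_id, "_player_" ++ PySem.Int.toStr i ++ "_quality_player", "field_5640cc8323220"),
        (episode_id, "player_" ++ PySem.Int.toStr i ++ "_embed_player", iframe),
        (episode_id, "_player_" ++ PySem.Int.toStr i ++ "_embed_player", "field_5640cc9823221") ]) []

-- ===== PORT B =====
-- cell k: the k-th output tuple, computed from the flat index k (player i = k//8, slot = k%8, j = slot//2)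
def pvCell (episode_id : Int) (players : List String) (quality : String) (k : Int) : Int × String × String :=
  let i := PySem.Int.floordiv k 8
  let slot := PySem.Int.mod k 8
  let j := PySem.Int.floordiv slot 2
  let suffix := PySem.List.pyGetD (["name_player", "type_player", "quality_player", "embed_player"] : List String) j ""
  if PySem.Int.mod slot 2 ≠ 0 then
    (episode_id, "_player_" ++ PySem.Int.toStr i ++ "_" ++ suffix,
      PySem.List.pyGetD (["field_5a6ae00d1df8f", "field_591fd3cc1c291", "field_5640cc8323220", "field_5640cc9823221"] : List String) j "")
  else
    (episode_id, "player_" ++ PySem.Int.toStr i ++ "_" ++ suffix,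
      PySem.List.pyGetD (["", "p_embed", quality, PySem.List.pyGetD players i ""] : List String) j "")

def generate_players_postmeta_data_alt (episode_id : Int) (players : List String) (quality : String) : List (Int × String × String) :=
  (PySem.List.pyRange 0 (8 * players.length) 1).map (pvCell episode_id players quality)

-- ===== PRECONDITION & SPEC =====
def Spec_generate_players_postmeta_data (episode_id : Int) (players : List String) (quality : String) (out : List (Int × String × String)) : Prop := out = generate_players_postmeta_data_alt episode_id players quality
instance (episode_id : Int) (players : List String) (quality : String) (out : List (Int × String × String)) : Decidable (Spec_generate_players_postmeta_data episode_id players quality out) := by unfold Spec_generate_players_postmeta_data; infer_instance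

-- ===== CLAIM (what is proved, stated in full; the proofs are below) =====
def Claim_equal_generate_players_postmeta_data : Prop := ∀ (episode_id : Int) (players : List String) (quality : String), Dom_generate_players_postmeta_data episode_id players quality → Spec_generate_players_postmeta_data episode_id players quality (generate_players_postmeta_data episode_id players quality)

-- ===== LEMMAS AND PROOFS =====

lemma pvCell_eval (e : Int) (ps : List String) (q : String) (n : Nat) :
    [ pvCell e ps q (8 * n), pvCell e ps q (8 * n + 1), pvCell e ps q (8 * n + 2),
      pvCell e ps q (8 * n + 3), pvCell e ps q (8 * n + 4), pvCell e ps q (8 * n + 5),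
      pvCell e ps q (8 * n + 6), pvCell e ps q (8 * n + 7) ] =
    ( [ (e, "player_" ++ PySem.Int.toStr n ++ "_name_player", ""),
        (e, "_player_" ++ PySem.Int.toStr n ++ "_name_player", "field_5a6ae00d1df8f"),
        (e, "player_" ++ PySem.Int.toStr n ++ "_type_player", "p_embed"),
        (e, "_player_" ++ PySem.Int.toStr n ++ "_type_player", "field_591fd3cc1c291"),
        (e, "player_" ++ PySem.Int.toStr n ++ "_quality_player", q),
        (e, "_player_" ++ PySem.Int.toStr n ++ "_quality_player", "field_5640cc8323220"),
        (e, "player_" ++ PySem.Int.toStr n ++ "_embed_player", PySem.List.pyGetD ps (n : Int) ""),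
        (e, "_player_" ++ PySem.Int.toStr n ++ "_embed_player", "field_5640cc9823221") ]) := by
  have hdiv : ∀ k : Int, 0 ≤ k → k < 8 → PySem.Int.floordiv (8 * (n : Int) + k) 8 = n := by
    intro k h0 h8
    rw [PySem.Int.floordiv_eq_ediv_of_pos (by norm_num)]; omega
  have hmod : ∀ k : Int, 0 ≤ k → k < 8 → PySem.Int.mod (8 * (n : Int) + k) 8 = k := by
    intro k h0 h8
    rw [PySem.Int.mod_eq_emod_of_pos (by norm_num)]; omega
  have hdiv0 : PySem.Int.floordiv (8 * (n : Int)) 8 = n := by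
    rw [PySem.Int.floordiv_eq_ediv_of_pos (by norm_num)]; omega
  have hmod0 : PySem.Int.mod (8 * (n : Int)) 8 = 0 := by
    rw [PySem.Int.mod_eq_emod_of_pos (by norm_num)]; omega
  simp only [pvCell]
  rw [hdiv0, hmod0]
  rw [hdiv 1 (by norm_num) (by norm_num), hmod 1 (by norm_num) (by norm_num)]
  rw [hdiv 2 (by norm_num) (by norm_num), hmod 2 (by norm_num) (by norm_num)]
  rw [hdiv 3 (by norm_num) (by norm_num), hmod 3 (by norm_num) (by norm_num)]
  rw [hdiv 4 (by norm_num) (by norm_num), hmod 4 (by norm_num) (by norm_num)]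
  rw [hdiv 5 (by norm_num) (by norm_num), hmod 5 (by norm_num) (by norm_num)]
  rw [hdiv 6 (by norm_num) (by norm_num), hmod 6 (by norm_num) (by norm_num)]
  rw [hdiv 7 (by norm_num) (by norm_num), hmod 7 (by norm_num) (by norm_num)]
  simp only [(by decide : PySem.Int.mod (0:Int) 2 = 0), (by decide : PySem.Int.mod (1:Int) 2 = 1), (by decide : PySem.Int.mod (2:Int) 2 = 0), (by decide : PySem.Int.mod (3:Int) 2 = 1), (by decide : PySem.Int.mod (4:Int) 2 = 0), (by decide : PySem.Int.mod (5:Int) 2 = 1), (by decide : PySem.Int.mod (6:Int) 2 = 0), (by decide : PySem.Int.mod (7:Int) 2 = 1), (by decide : PySem.Int.floordiv (0:Int) 2 = 0), (by decide : PySem.Int.floordiv (1:Int) 2 = 0), (by decide : PySem.Int.floordiv (2:Int) 2 = 1), (by decide : PySem.Int.floordiv (3:Int) 2 = 1), (by decide : PySem.Int.floordiv (4:Int) 2 = 2), (by decide : PySem.Int.floordiv (5:Int) 2 = 2), (by decide : PySem.Int.floordiv (6:Int) 2 = 3), (by decide : PySem.Int.floordiv (7:Int) 2 = 3)]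
  norm_num [PySem.List.pyGetD, PySem.List.pyGet?, PySem.List.pyIdx?, String.append_assoc,
    (by decide : Int.toNat 0 = 0), (by decide : Int.toNat 1 = 1), (by decide : Int.toNat 2 = 2),
    (by decide : Int.toNat 3 = 3), List.getElem_cons_zero, List.getElem_cons_succ,
    (by decide : "_" ++ "name_player" = "_name_player"), (by decide : "_" ++ "type_player" = "_type_player"), (by decide : "_" ++ "quality_player" = "_quality_player"), (by decide : "_" ++ "embed_player" = "_embed_player")]

-- both sides agree for a list of length n, by induction on n
lemma pv_main (e : Int) (ps : List String) (q : String) (n : Nat) :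
    (PySem.List.pyRange 0 (n : Int) 1).foldl (fun res i =>
      let iframe := PySem.List.pyGetD ps i ""
      res ++
        [ (e, "player_" ++ PySem.Int.toStr i ++ "_name_player", ""),
          (e, "_player_" ++ PySem.Int.toStr i ++ "_name_player", "field_5a6ae00d1df8f"),
          (e, "player_" ++ PySem.Int.toStr i ++ "_type_player", "p_embed"),
          (e, "_player_" ++ PySem.Int.toStr i ++ "_type_player", "field_591fd3cc1c291"),
          (e, "player_" ++ PySem.Int.toStr i ++ "_quality_player", q),
          (e, "_player_" ++ PySem.Int.toStr i ++ "_quality_player", "field_5640cc8323220"),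
          (e, "player_" ++ PySem.Int.toStr i ++ "_embed_player", iframe),
          (e, "_player_" ++ PySem.Int.toStr i ++ "_embed_player", "field_5640cc9823221") ]) [] =
    (PySem.List.pyRange 0 (8 * (n : Int)) 1).map (pvCell e ps q) := by
  induction n with
  | zero => simp [PySem.List.pyRange_one_eq_nil]
  | succ m ih =>
    rw [show ((m + 1 : Nat) : Int) = (m : Int) + 1 by push_cast; ring,
      PySem.List.pyRange_one_succ_right (by positivity),
      List.foldl_append, ih]
    rw [show (8 * ((m : Int) + 1)) = (8 * (m : Int) + 7) + 1 by ring,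
      PySem.List.pyRange_one_succ_right (by positivity)]
    rw [show (8 * (m : Int) + 7) = (8 * (m : Int) + 6) + 1 by ring,
      PySem.List.pyRange_one_succ_right (by positivity)]
    rw [show (8 * (m : Int) + 6) = (8 * (m : Int) + 5) + 1 by ring,
      PySem.List.pyRange_one_succ_right (by positivity)]
    rw [show (8 * (m : Int) + 5) = (8 * (m : Int) + 4) + 1 by ring,
      PySem.List.pyRange_one_succ_right (by positivity)]
    rw [show (8 * (m : Int) + 4) = (8 * (m : Int) + 3) + 1 by ring,
      PySem.List.pyRange_one_succ_right (by positivity)]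
    rw [show (8 * (m : Int) + 3) = (8 * (m : Int) + 2) + 1 by ring,
      PySem.List.pyRange_one_succ_right (by positivity)]
    rw [show (8 * (m : Int) + 2) = (8 * (m : Int) + 1) + 1 by ring,
      PySem.List.pyRange_one_succ_right (by positivity)]
    rw [show (8 * (m : Int) + 1) = (8 * (m : Int)) + 1 by ring,
      PySem.List.pyRange_one_succ_right (by positivity)]
    simp only [List.map_append, List.map_cons, List.map_nil, List.foldl_cons, List.foldl_nil]
    have hc := pvCell_eval e ps q m
    ring_nf at hc ⊢
    simp only [List.append_assoc, List.cons_append, List.nil_append]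
    rw [hc]

-- ===== VERDICT (by name: the statement is the Claim_ definition above) =====
theorem generate_players_postmeta_data_spec : Claim_equal_generate_players_postmeta_data := by
  intro e ps q _
  unfold Spec_generate_players_postmeta_data generate_players_postmeta_data generate_players_postmeta_data_alt
  have h := pv_main e ps q ps.length
  simpa using h
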